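-- pv_equiv track=rewrite | github.com/rwgk/stuff | periodic_table_of_elements_left_step/make_alpha_index_svg_v3.py | greedy_columns
-- ===== SOURCE A (Python) =====
-- def greedy_columns(letters, grouped, cols, include_headers=True, header_weight=1):
--     sections = []
--     for L in letters:
--         lines = (header_weight if include_headers else 0) + len(grouped[L])
--         sections.append((L, lines))
--     buckets = [[] for _ in range(cols)]
--     heights = [0]*cols
--     for L, lines in sections:
--         i = min(range(cols), key=lambda c: heights[c])
--         buckets[i].append(L)
--         heights[i] += lines
--     return buckets
-- ===== SOURCE B (Python) =====
-- def greedy_columns(letters, grouped, cols, include_headers=True, header_weight=1):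
--     base = header_weight if include_headers else 0
--     heap = [(0, i) for i in range(cols)]  # kept sorted ascending: (height, index)
--     buckets = [[] for _ in range(cols)]
--     for L in letters:
--         h, i = heap.pop(0)  # smallest height, smallest index on ties
--         buckets[i].append(L)
--         item = (h + base + len(grouped[L]), i)
--         j = 0
--         while j < len(heap) and heap[j] < item:
--             j += 1
--         heap.insert(j, item)
--     return buckets
-- ===== Notes on version B (the rewrite author's own statement) =====
-- stated objective: alternative
-- what changed: Replaces the per-letter linear argmin scan over a heights array with a priority queue of (height, index) pairs kept in sorted order: the column is taken from the queue front and the updated pair re-inserted in order; the (height, index) key reproduces min's smallest-index tie-break.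
import Mathlib
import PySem

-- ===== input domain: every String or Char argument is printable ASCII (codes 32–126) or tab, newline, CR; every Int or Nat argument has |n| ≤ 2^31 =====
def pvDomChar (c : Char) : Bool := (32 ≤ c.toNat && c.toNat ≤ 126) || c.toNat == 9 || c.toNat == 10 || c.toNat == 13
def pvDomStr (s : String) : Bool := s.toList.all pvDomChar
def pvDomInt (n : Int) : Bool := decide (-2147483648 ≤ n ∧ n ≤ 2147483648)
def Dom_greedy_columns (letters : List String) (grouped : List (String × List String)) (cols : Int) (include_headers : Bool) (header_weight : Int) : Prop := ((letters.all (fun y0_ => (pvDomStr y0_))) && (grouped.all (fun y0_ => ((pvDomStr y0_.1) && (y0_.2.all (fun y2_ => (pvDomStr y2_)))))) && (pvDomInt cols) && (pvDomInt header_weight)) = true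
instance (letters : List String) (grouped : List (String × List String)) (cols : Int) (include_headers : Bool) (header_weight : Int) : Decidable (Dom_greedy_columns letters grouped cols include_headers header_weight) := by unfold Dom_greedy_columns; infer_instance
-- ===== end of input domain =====

-- B replaces A's per-letter argmin scan over a heights array by a priority queue of
-- (height, index) pairs kept in ascending order (pop front, ordered re-insert); same cost class.

-- ===== PORT A =====
def greedy_columns (letters : List String) (grouped : List (String × List String)) (cols : Int) (include_headers : Bool) (header_weight : Int) : List (List String) :=
  let d := PySem.Dict.ofList grouped
  -- sections.append((L, lines)); grouped[L] raises KeyError for a missing key — excluded by Pre_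
  let sections : List (String × Int) := letters.foldl (fun acc L =>
    acc ++ [(L, (if include_headers then header_weight else (0:Int)) + PySem.List.len (d.getD L []))]) []
  let buckets0 : List (List String) := (PySem.List.pyRange 0 cols 1).map (fun _ => [])
  let heights0 : List Int := (PySem.List.pyRange 0 cols 1).map (fun _ => 0)
  let final := sections.foldl (fun (st : List (List String) × List Int) sec =>
    match PySem.List.min? (PySem.List.pyRange 0 cols 1) (fun c => PySem.List.pyGetD st.2 c 0) with
    | none => st  -- Python: ValueError (min of empty range); excluded by Pre_
    | some i =>
      (st.1.set i.toNat (PySem.List.pyGetD st.1 i [] ++ [sec.1]),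
       st.2.set i.toNat (PySem.List.pyGetD st.2 i 0 + sec.2))) (buckets0, heights0)
  final.1

-- ===== PORT B =====
-- Python tuple comparison heap[j] < item (strict lexicographic on (Int, Int)); exact
def pvLexLt (a b : Int × Int) : Bool := a.1 < b.1 || (a.1 == b.1 && a.2 < b.2)

-- the `j = 0; while heap[j] < item: j += 1; heap.insert(j, item)` loop of Source B
def pvHeapPush (x : Int × Int) : List (Int × Int) → List (Int × Int)
  | [] => [x]
  | y :: t => if pvLexLt y x then y :: pvHeapPush x t else x :: y :: t

-- the `for L in letters` loop of Source B
def pvLoopB (d : PySem.Dict String (List String)) (base : Int) :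
    List String → List (Int × Int) → List (List String) → List (List String)
  | [], _, buckets => buckets
  | _ :: _, [], buckets => buckets  -- Python: IndexError (pop from empty heap); excluded by Pre_
  | L :: rest, (h, i) :: t, buckets =>
      pvLoopB d base rest (pvHeapPush (h + base + PySem.List.len (d.getD L []), i) t)
        (buckets.set i.toNat (PySem.List.pyGetD buckets i [] ++ [L]))

def greedy_columns_alt (letters : List String) (grouped : List (String × List String)) (cols : Int) (include_headers : Bool) (header_weight : Int) : List (List String) :=
  let d := PySem.Dict.ofList grouped
  let base : Int := if include_headers then header_weight else 0
  pvLoopB d base letters ((PySem.List.pyRange 0 cols 1).map (fun i => ((0:Int), i)))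
    ((PySem.List.pyRange 0 cols 1).map (fun _ => []))

-- ===== PRECONDITION & SPEC =====
-- Pre_ excludes exactly the inputs where the Python A raises: a letter missing from grouped
-- (KeyError), or cols ≤ 0 with letters nonempty (ValueError: min of an empty range).
def Pre_greedy_columns (letters : List String) (grouped : List (String × List String)) (cols : Int) (include_headers : Bool) (header_weight : Int) : Prop :=
  (letters = [] ∨ 0 < cols) ∧ ∀ L ∈ letters, L ∈ grouped.map Prod.fst
instance (letters : List String) (grouped : List (String × List String)) (cols : Int) (include_headers : Bool) (header_weight : Int) : Decidable (Pre_greedy_columns letters grouped cols include_headers header_weight) := by unfold Pre_greedy_columns; infer_instance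

def pvWitness_greedy_columns : List String × (List (String × List String)) × Int × Bool × Int :=
  (["a", "b", "c"], [("a", ["x"]), ("b", ["x", "y"]), ("c", [])], 2, true, 1)

def Spec_greedy_columns (letters : List String) (grouped : List (String × List String)) (cols : Int) (include_headers : Bool) (header_weight : Int) (out : List (List String)) : Prop := out = greedy_columns_alt letters grouped cols include_headers header_weight
instance (letters : List String) (grouped : List (String × List String)) (cols : Int) (include_headers : Bool) (header_weight : Int) (out : List (List String)) : Decidable (Spec_greedy_columns letters grouped cols include_headers header_weight out) := by unfold Spec_greedy_columns; infer_instance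

-- ===== CLAIM (what is proved, stated in full; the proofs are below) =====
def Claim_equal_greedy_columns : Prop := ∀ (letters : List String) (grouped : List (String × List String)) (cols : Int) (include_headers : Bool) (header_weight : Int), Dom_greedy_columns letters grouped cols include_headers header_weight → Pre_greedy_columns letters grouped cols include_headers header_weight → Spec_greedy_columns letters grouped cols include_headers header_weight (greedy_columns letters grouped cols include_headers header_weight)

-- ===== LEMMAS AND PROOFS =====

-- the ≤-lexicographic order on (height, index) pairs, as a Prop
def pvLe (a b : Int × Int) : Prop := a.1 < b.1 ∨ (a.1 = b.1 ∧ a.2 ≤ b.2)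

-- the multiset of (height, index) pairs a heights list denotes
def pvPairsOf (hs : List Int) : List (Int × Int) := hs.zipIdx.map (fun p => (p.1, (p.2 : Int)))

theorem pvLe_total (a b : Int × Int) : pvLexLt a b = false → pvLe b a := by
  unfold pvLexLt pvLe
  intro h
  simp only [Bool.or_eq_false_iff, Bool.and_eq_false_iff, decide_eq_false_iff_not, beq_eq_false_iff_ne] at h
  rcases h with ⟨h1, h2⟩
  rcases h2 with h2 | h2 <;> omega

theorem pvLe_of_lt (a b : Int × Int) : pvLexLt a b = true → pvLe a b := by
  unfold pvLexLt pvLe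
  intro h
  simp only [Bool.or_eq_true, Bool.and_eq_true, decide_eq_true_eq, beq_iff_eq] at h
  rcases h with h | h <;> omega

theorem pvLe_trans (a b c : Int × Int) : pvLe a b → pvLe b c → pvLe a c := by
  unfold pvLe; intro h1 h2; rcases h1 with h1 | h1 <;> rcases h2 with h2 | h2 <;> omega

theorem pvHeapPush_perm (x : Int × Int) (l : List (Int × Int)) :
    (pvHeapPush x l).Perm (x :: l) := by
  induction l with
  | nil => simp [pvHeapPush]
  | cons y t ih =>
    simp only [pvHeapPush]
    split
    · exact ((ih.cons y).trans (List.Perm.swap x y t))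
    · exact List.Perm.refl _

theorem pvHeapPush_pairwise (x : Int × Int) (l : List (Int × Int))
    (hp : l.Pairwise pvLe) : (pvHeapPush x l).Pairwise pvLe := by
  induction l with
  | nil => simp [pvHeapPush]
  | cons y t ih =>
    rcases List.pairwise_cons.mp hp with ⟨hy, ht⟩
    simp only [pvHeapPush]
    split
    · rename_i hlt
      refine List.pairwise_cons.mpr ⟨?_, ih ht⟩
      intro z hz
      rcases List.mem_cons.mp ((pvHeapPush_perm x t).mem_iff.mp hz) with rfl | hz
      · exact pvLe_of_lt _ _ hlt
      · exact hy z hz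
    · rename_i hnlt
      have hxy : pvLe x y := pvLe_total _ _ (by simpa using hnlt)
      refine List.pairwise_cons.mpr ⟨?_, hp⟩
      intro z hz
      rcases List.mem_cons.mp hz with rfl | hz
      · exact hxy
      · exact pvLe_trans _ _ _ hxy (hy z hz)

theorem pvPairsOf_length (hs : List Int) : (pvPairsOf hs).length = hs.length := by
  simp [pvPairsOf]

theorem pvPairsOf_getElem (hs : List Int) (j : Nat) (hj : j < (pvPairsOf hs).length) :
    (pvPairsOf hs)[j] = (hs[j]'(by simpa [pvPairsOf_length] using hj), (j : Int)) := by
  simp [pvPairsOf]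

theorem pvPairsOf_set (hs : List Int) (j : Nat) (v : Int) :
    pvPairsOf (hs.set j v) = (pvPairsOf hs).set j (v, (j : Int)) := by
  apply List.ext_getElem
  · simp [pvPairsOf_length]
  · intro k hk hk'
    by_cases hkj : k = j
    · subst hkj
      rw [pvPairsOf_getElem, List.getElem_set_self (by simpa [pvPairsOf_length] using hk')]
      simp
    · have hjk : j ≠ k := Ne.symm hkj
      simp [pvPairsOf_getElem, hjk]

-- min?'s fold step, named so the fold can be reasoned about
def pvMinStep (key : Int → Int) : Option Int → Int → Option Int := fun acc x =>
  match acc with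
  | none => some x
  | some m => if key x < key m then some x else some m

theorem pvMin?_eq (xs : List Int) (key : Int → Int) :
    PySem.List.min? xs key = xs.foldl (pvMinStep key) none := by
  unfold PySem.List.min?
  congr 1
  funext acc x
  cases acc <;> rfl

-- min?'s fold keeps its accumulator when nothing later is strictly smaller
theorem pvFold_keep (key : Int → Int) (t : List Int) (m : Int)
    (h : ∀ y ∈ t, ¬ key y < key m) :
    t.foldl (pvMinStep key) (some m) = some m := by
  induction t with
  | nil => rfl
  | cons y t ih =>
    simp only [List.foldl_cons]
    have : pvMinStep key (some m) y = some m := by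
      unfold pvMinStep
      simp [h y (by simp)]
    rw [this]
    exact ih (fun z hz => h z (by simp [hz]))

-- min? of p ++ i :: s is i when i beats p strictly and s weakly
theorem pvMin?_split (key : Int → Int) (p s : List Int) (i : Int)
    (hp : ∀ c ∈ p, key i < key c) (hs : ∀ c ∈ s, key i ≤ key c) :
    PySem.List.min? (p ++ i :: s) key = some i := by
  rw [pvMin?_eq, List.foldl_append]
  have hstep : (p.foldl (pvMinStep key) none) = none ∨
      ∃ m₀ ∈ p, (p.foldl (pvMinStep key) none) = some m₀ := by
    cases hfp : (p.foldl (pvMinStep key) none) with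
    | none => exact Or.inl rfl
    | some m₀ =>
      refine Or.inr ⟨m₀, ?_, rfl⟩
      exact PySem.List.min?_mem (xs := p) (key := key) (m := m₀) (by rw [pvMin?_eq]; exact hfp)
  rcases hstep with hfp | ⟨m₀, hm₀, hfp⟩ <;> rw [hfp] <;> simp only [List.foldl_cons]
  · have : pvMinStep key none i = some i := rfl
    rw [this]
    exact pvFold_keep key s i (fun y hy => by have := hs y hy; omega)
  · have : pvMinStep key (some m₀) i = some i := by
      unfold pvMinStep
      simp [hp m₀ hm₀]
    rw [this]
    exact pvFold_keep key s i (fun y hy => by have := hs y hy; omega)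

-- head of the sorted heap is A's argmin: min? over range(cols) returns its index
theorem pvHead_argmin (heights : List Int) (t : List (Int × Int)) (h i : Int)
    (hperm : ((h, i) :: t).Perm (pvPairsOf heights)) (hsort : ((h, i) :: t).Pairwise pvLe) :
    PySem.List.min? (PySem.List.pyRange 0 (heights.length : Int) 1)
        (fun c => PySem.List.pyGetD heights c 0) = some i ∧
      0 ≤ i ∧ i.toNat < heights.length ∧ heights.getD i.toNat 0 = h := by
  have hmemhead : (h, i) ∈ pvPairsOf heights := hperm.mem_iff.mp (by simp)
  rcases List.mem_iff_getElem.mp hmemhead with ⟨j, hj, hje⟩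
  rw [pvPairsOf_getElem] at hje
  have hij : i = (j : Int) := (congrArg Prod.snd hje).symm
  have hhj : heights[j]'(by simpa [pvPairsOf_length] using hj) = h := congrArg Prod.fst hje
  have hjlen : j < heights.length := by simpa [pvPairsOf_length] using hj
  have hmin : ∀ q ∈ pvPairsOf heights, pvLe (h, i) q := by
    intro q hq
    rcases List.mem_cons.mp (hperm.symm.mem_iff.mp hq) with rfl | hq'
    · exact Or.inr ⟨rfl, le_refl _⟩
    · exact (List.pairwise_cons.mp hsort).1 q hq'
  have hminc : ∀ (k : Nat) (hk : k < heights.length), pvLe (h, i) (heights[k], (k : Int)) := by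
    intro k hk
    apply hmin
    exact List.mem_iff_getElem.mpr ⟨k, by simpa [pvPairsOf_length] using hk, by rw [pvPairsOf_getElem]⟩
  have key_eq : ∀ (k : Nat) (hk : k < heights.length),
      PySem.List.pyGetD heights (k : Int) 0 = heights[k]'hk := by
    intro k hk
    rw [PySem.List.pyGetD_of_nonneg _ _ (by positivity)]
    simp [List.getD, List.getElem?_eq_getElem hk]
  refine ⟨?_, by omega, by omega, ?_⟩
  · rw [PySem.List.pyRange_one_append 0 (j : Int) (heights.length : Int) (by positivity)
        (by exact_mod_cast hjlen.le),
      PySem.List.pyRange_one_cons (a := (j : Int)) (b := (heights.length : Int))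
        (by exact_mod_cast hjlen)]
    rw [hij]
    apply pvMin?_split
    · intro c hc
      rw [PySem.List.mem_pyRange_one] at hc
      have hcn : c = ((c.toNat : Nat) : Int) := by omega
      have hclt : c.toNat < heights.length := by omega
      rw [key_eq j hjlen, hcn, key_eq c.toNat hclt]
      rcases hminc c.toNat hclt with hlt | ⟨heq, hle⟩
      · rw [← hhj] at hlt; omega
      · exfalso; rw [hij] at hle; omega
    · intro c hc
      rw [PySem.List.mem_pyRange_one] at hc
      have hcn : c = ((c.toNat : Nat) : Int) := by omega
      have hclt : c.toNat < heights.length := by omega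
      rw [key_eq j hjlen, hcn, key_eq c.toNat hclt]
      rcases hminc c.toNat hclt with hlt | ⟨heq, hle⟩ <;> rw [← hhj] at * <;> omega
  · have hij' : i.toNat = j := by omega
    rw [hij']
    simp [List.getD, List.getElem?_eq_getElem hjlen, hhj]

-- one step preserves the heap invariant
theorem pvStep_inv (heights : List Int) (t : List (Int × Int)) (h i v : Int)
    (hperm : ((h, i) :: t).Perm (pvPairsOf heights)) (hsort : ((h, i) :: t).Pairwise pvLe)
    (hi0 : 0 ≤ i) (hilen : i.toNat < heights.length)
    (hhv : heights.getD i.toNat 0 = h) :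
    (pvHeapPush (v, i) t).Perm (pvPairsOf (heights.set i.toNat v)) ∧
      (pvHeapPush (v, i) t).Pairwise pvLe := by
  have hplen : i.toNat < (pvPairsOf heights).length := by simpa [pvPairsOf_length] using hilen
  have hsplit : pvPairsOf heights =
      (pvPairsOf heights).take i.toNat ++ (h, i) :: (pvPairsOf heights).drop (i.toNat + 1) := by
    conv_lhs => rw [← List.take_append_drop i.toNat (pvPairsOf heights)]
    congr 1
    rw [List.drop_eq_getElem_cons hplen]
    congr 1
    rw [pvPairsOf_getElem]
    have h1 : heights[i.toNat]'hilen = h := by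
      rw [← hhv]; simp [List.getD, List.getElem?_eq_getElem hilen]
    have h2 : ((i.toNat : Nat) : Int) = i := by omega
    rw [h1, h2]
  constructor
  · have htail : t.Perm ((pvPairsOf heights).take i.toNat ++ (pvPairsOf heights).drop (i.toNat + 1)) := by
      have hx : ((h, i) :: t).Perm ((h, i) :: ((pvPairsOf heights).take i.toNat ++ (pvPairsOf heights).drop (i.toNat + 1))) := by
        refine hperm.trans ?_
        nth_rewrite 1 [hsplit]
        exact List.perm_middle
      exact hx.cons_inv
    have hset : pvPairsOf (heights.set i.toNat v) =
        (pvPairsOf heights).take i.toNat ++ (v, i) :: (pvPairsOf heights).drop (i.toNat + 1) := by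
      rw [pvPairsOf_set, List.set_eq_take_append_cons_drop, if_pos hplen]
      have h2 : ((i.toNat : Nat) : Int) = i := by omega
      rw [h2]
    refine ((pvHeapPush_perm _ _).trans (htail.cons _)).trans ?_
    rw [hset]
    exact List.perm_middle.symm
  · exact pvHeapPush_pairwise _ _ (List.pairwise_cons.mp hsort).2

-- main loop correspondence: A's fold over (heights, buckets) = B's loop over the sorted heap
theorem pvMain (d : PySem.Dict String (List String)) (base : Int) (cols : Int) :
    ∀ (letters : List String) (heights : List Int) (heap : List (Int × Int)) (buckets : List (List String)),
    heap.Perm (pvPairsOf heights) → heap.Pairwise pvLe →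
    (letters = [] ∨ ((heights.length : Int) = cols ∧ 0 < cols)) →
    (letters.foldl (fun (st : List (List String) × List Int) L =>
      match PySem.List.min? (PySem.List.pyRange 0 cols 1) (fun c => PySem.List.pyGetD st.2 c 0) with
      | none => st
      | some i =>
        (st.1.set i.toNat (PySem.List.pyGetD st.1 i [] ++ [L]),
         st.2.set i.toNat (PySem.List.pyGetD st.2 i 0 + (base + PySem.List.len (d.getD L []))))) (buckets, heights)).1
      = pvLoopB d base letters heap buckets := by
  intro letters
  induction letters with
  | nil => intro heights heap buckets _ _ _; simp [pvLoopB]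
  | cons L rest ih =>
    intro heights heap buckets hperm hsort hc
    rcases hc with hc | ⟨hlen, hpos⟩
    · exact absurd hc (by simp)
    · have hheapne : heap ≠ [] := by
        intro hnil
        rw [hnil] at hperm
        have := hperm.length_eq
        simp [pvPairsOf_length] at this
        omega
      rcases heap with _ | ⟨⟨h, i⟩, t⟩
      · exact absurd rfl hheapne
      obtain ⟨hmin, hi0, hilen, hgetD⟩ := pvHead_argmin heights t h i hperm hsort
      have hcols : ((heights.length : Int)) = cols := hlen
      rw [← hcols]
      simp only [List.foldl_cons, hmin]
      have hgi : PySem.List.pyGetD heights i 0 = h := by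
        rw [PySem.List.pyGetD_of_nonneg _ _ hi0, hgetD]
      rw [hgi]
      have hstep := pvStep_inv heights t h i (h + (base + PySem.List.len (d.getD L []))) hperm hsort hi0 hilen hgetD
      have hassoc : h + base + PySem.List.len (d.getD L []) = h + (base + PySem.List.len (d.getD L [])) := by ring
      simp only [pvLoopB, hassoc]
      rw [hcols]
      exact ih _ _ _ hstep.1 hstep.2
        (Or.inr ⟨by simpa using hlen, hpos⟩)

-- the sections loop builds exactly the per-letter (L, lines) map
theorem pvSections_eq (d : PySem.Dict String (List String)) (base : Int) (letters : List String) :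
    letters.foldl (fun acc L => acc ++ [(L, base + PySem.List.len (d.getD L []))]) ([] : List (String × Int))
      = letters.map (fun L => (L, base + PySem.List.len (d.getD L []))) := by
  rw [PySem.List.foldl_append_eq_flatMap (fun L => [(L, base + PySem.List.len (d.getD L []))]) letters []]
  simp only [List.nil_append]
  induction letters with
  | nil => rfl
  | cons a l ih => simp [List.flatMap] at ih ⊢; exact ih

-- the two initial heap representations coincide
theorem pvInit_eq (cols : Int) :
    (PySem.List.pyRange 0 cols 1).map (fun i => ((0 : Int), i))
      = pvPairsOf ((PySem.List.pyRange 0 cols 1).map (fun _ => (0 : Int))) := by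
  apply List.ext_getElem
  · simp [pvPairsOf_length]
  · intro k hk hk'
    rw [pvPairsOf_getElem]
    simp [PySem.List.getElem_pyRange_one]

theorem pvInit_pairwise (cols : Int) :
    (((PySem.List.pyRange 0 cols 1).map (fun i => ((0 : Int), i))).Pairwise pvLe) := by
  apply List.Pairwise.map
  · intro a b hab
    exact Or.inr ⟨rfl, le_of_lt hab⟩
  · exact PySem.List.pairwise_lt_pyRange_one 0 cols

-- ===== VERDICT (by name: the statement is the Claim_ definition above) =====
theorem greedy_columns_spec : Claim_equal_greedy_columns := by
  intro letters grouped cols include_headers header_weight _ hpre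
  unfold Spec_greedy_columns greedy_columns greedy_columns_alt
  simp only []
  rw [pvSections_eq, List.foldl_map]
  rw [pvMain (PySem.Dict.ofList grouped) (if include_headers then header_weight else 0) cols letters
    _ _ _ (by rw [pvInit_eq]) (pvInit_pairwise cols) ?_]
  rcases hpre.1 with hnil | hpos
  · exact Or.inl hnil
  · refine Or.inr ⟨?_, hpos⟩
    simp [PySem.List.length_pyRange_one]
    omega
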